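-- pv_equiv track=rewrite | github.com/zalmoxes-laran/EM-blender-tools | anastylosis_manager/lod_utils.py | _resolve_lod_with_fallback
-- ===== SOURCE A (Python) =====
-- LOD_MIN_LEVEL = 0
--
-- LOD_MAX_LEVEL = 4
--
-- def _resolve_lod_with_fallback(available_levels, requested_level, min_level=LOD_MIN_LEVEL, max_level=LOD_MAX_LEVEL):
--     """Clamp request to [min,max] and fallback to highest available <= request."""
--     if not available_levels:
--         return None
--
--     req = max(min_level, min(max_level, int(requested_level)))
--     levels_in_range = sorted({lvl for lvl in available_levels if min_level <= lvl <= max_level})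
--     if not levels_in_range:
--         return None
--
--     lower_or_equal = [lvl for lvl in levels_in_range if lvl <= req]
--     if lower_or_equal:
--         return max(lower_or_equal)
--
--     # If no lower level exists, use the minimum available in range.
--     return min(levels_in_range)
-- ===== SOURCE B (Python) =====
-- LOD_MIN_LEVEL = 0
--
-- LOD_MAX_LEVEL = 4
--
-- def _resolve_lod_with_fallback(available_levels, requested_level, min_level=LOD_MIN_LEVEL, max_level=LOD_MAX_LEVEL):
--     """Clamp request to [min,max]; one accumulator pass replaces set/sort/filter passes."""
--     if not available_levels:
--         return None
--
--     req = max(min_level, min(max_level, int(requested_level)))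
--     best_le = None
--     min_in_range = None
--     for lvl in available_levels:
--         if min_level <= lvl <= max_level:
--             if lvl <= req and (best_le is None or lvl > best_le):
--                 best_le = lvl
--             if min_in_range is None or lvl < min_in_range:
--                 min_in_range = lvl
--     if best_le is not None:
--         return best_le
--     return min_in_range
-- ===== Notes on version B (the rewrite author's own statement) =====
-- stated objective: simpler
-- what changed: Replaces building a deduplicated set, sorting it and two filter passes with max/min by a single accumulator pass that tracks the best in-range level <= request and the minimum in-range level.
import Mathlib
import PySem

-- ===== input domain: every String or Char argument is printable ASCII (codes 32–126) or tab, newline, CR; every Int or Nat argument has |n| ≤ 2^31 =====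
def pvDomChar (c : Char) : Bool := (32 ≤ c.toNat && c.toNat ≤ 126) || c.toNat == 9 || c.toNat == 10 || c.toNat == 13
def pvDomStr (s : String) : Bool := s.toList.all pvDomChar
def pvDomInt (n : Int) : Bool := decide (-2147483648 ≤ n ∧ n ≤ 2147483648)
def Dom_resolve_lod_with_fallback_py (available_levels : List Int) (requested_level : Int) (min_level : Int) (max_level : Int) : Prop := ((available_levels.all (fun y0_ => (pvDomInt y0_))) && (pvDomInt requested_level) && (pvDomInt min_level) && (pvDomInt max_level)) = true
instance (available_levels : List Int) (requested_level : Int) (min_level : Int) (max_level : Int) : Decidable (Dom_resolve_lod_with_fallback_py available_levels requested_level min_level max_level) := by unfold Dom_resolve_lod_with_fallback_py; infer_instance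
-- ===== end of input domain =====

-- B replaces A's set/sort/two-filter machinery by one accumulator pass (objective: simpler).

-- ===== PORT A =====
def resolve_lod_with_fallback_py (available_levels : List Int) (requested_level : Int) (min_level : Int) (max_level : Int) : Option Int :=
  if available_levels = [] then none
  else
    let req := max min_level (min max_level requested_level)
    let levels_in_range :=
      PySem.List.sorted
        (PySem.Set.ofList (available_levels.filter (fun lvl => decide (min_level ≤ lvl ∧ lvl ≤ max_level))))
        (fun x => x) false
    if levels_in_range = [] then none
    else
      let lower_or_equal := levels_in_range.filter (fun lvl => decide (lvl ≤ req))
      if lower_or_equal ≠ [] then PySem.List.max? lower_or_equal (fun x => x)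
      else PySem.List.min? levels_in_range (fun x => x)

-- ===== PORT B =====
-- one fold over available_levels maintaining (best_le, min_in_range)
def pvStepB (min_level max_level req : Int) (acc : Option Int × Option Int) (lvl : Int) : Option Int × Option Int :=
  if min_level ≤ lvl ∧ lvl ≤ max_level then
    ((if lvl ≤ req then
        (match acc.1 with
         | none => some lvl
         | some b => if lvl > b then some lvl else some b)
      else acc.1),
     (match acc.2 with
      | none => some lvl
      | some m => if lvl < m then some lvl else some m))
  else acc

def resolve_lod_with_fallback_py_alt (available_levels : List Int) (requested_level : Int) (min_level : Int) (max_level : Int) : Option Int :=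
  if available_levels = [] then none
  else
    let req := max min_level (min max_level requested_level)
    let res := available_levels.foldl (pvStepB min_level max_level req) (none, none)
    match res.1 with
    | some b => some b
    | none => res.2

-- ===== PRECONDITION & SPEC =====
def Spec_resolve_lod_with_fallback_py (available_levels : List Int) (requested_level : Int) (min_level : Int) (max_level : Int) (out : Option Int) : Prop := out = resolve_lod_with_fallback_py_alt available_levels requested_level min_level max_level
instance (available_levels : List Int) (requested_level : Int) (min_level : Int) (max_level : Int) (out : Option Int) : Decidable (Spec_resolve_lod_with_fallback_py available_levels requested_level min_level max_level out) := by unfold Spec_resolve_lod_with_fallback_py; infer_instance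

-- ===== CLAIM (what is proved, stated in full; the proofs are below) =====
def Claim_equal_resolve_lod_with_fallback_py : Prop := ∀ (available_levels : List Int) (requested_level : Int) (min_level : Int) (max_level : Int), Dom_resolve_lod_with_fallback_py available_levels requested_level min_level max_level → Spec_resolve_lod_with_fallback_py available_levels requested_level min_level max_level (resolve_lod_with_fallback_py available_levels requested_level min_level max_level)

-- ===== LEMMAS AND PROOFS =====

-- the two single-value accumulators of B's step, in isolation
def pvMaxStep (o : Option Int) (x : Int) : Option Int :=
  match o with
  | none => some x
  | some b => if x > b then some x else some b

def pvMinStep (o : Option Int) (x : Int) : Option Int :=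
  match o with
  | none => some x
  | some m => if x < m then some x else some m

-- B's pair fold splits into two independent filtered folds
theorem pvFold_split (lo hi r : Int) (l : List Int) (a b : Option Int) :
    l.foldl (pvStepB lo hi r) (a, b)
      = ((l.filter (fun x => decide (lo ≤ x ∧ x ≤ hi) && decide (x ≤ r))).foldl pvMaxStep a,
         (l.filter (fun x => decide (lo ≤ x ∧ x ≤ hi))).foldl pvMinStep b) := by
  induction l generalizing a b with
  | nil => simp
  | cons x t ih =>
    by_cases h1 : lo ≤ x ∧ x ≤ hi
    · by_cases h2 : x ≤ r
      · cases a <;> simp [pvStepB, h1, h2, ih, pvMaxStep, pvMinStep]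
      · simp [pvStepB, h1, h2, ih, pvMinStep]
    · simp [pvStepB, h1, ih]

theorem pvMaxStep_some (t : List Int) (b : Int) :
    t.foldl pvMaxStep (some b) = some (t.foldl max b) := by
  induction t generalizing b with
  | nil => rfl
  | cons x t ih =>
    have hx : pvMaxStep (some b) x = some (max b x) := by
      by_cases h : x > b <;> simp [pvMaxStep, h, max_def] <;> omega
    simp [List.foldl_cons, hx, ih]

theorem pvMinStep_some (t : List Int) (b : Int) :
    t.foldl pvMinStep (some b) = some (t.foldl min b) := by
  induction t generalizing b with
  | nil => rfl
  | cons x t ih =>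
    have hx : pvMinStep (some b) x = some (min b x) := by
      by_cases h : x < b <;> simp [pvMinStep, h, min_def]
    simp [List.foldl_cons, hx, ih]

-- the running accumulator IS Python's max()/min?
theorem pvMaxFold_eq_max? (l : List Int) :
    l.foldl pvMaxStep none = PySem.List.max? l (fun x => x) := by
  cases l with
  | nil => rfl
  | cons x t =>
    simp [List.foldl_cons, pvMaxStep, pvMaxStep_some, PySem.List.max?_id_cons]

theorem pvMinFold_eq_min? (l : List Int) :
    l.foldl pvMinStep none = PySem.List.min? l (fun x => x) := by
  cases l with
  | nil => rfl
  | cons x t =>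
    simp [List.foldl_cons, pvMinStep, pvMinStep_some, PySem.List.min?_id_cons]

-- lists with the same members have the same Python max()/min()
theorem pvMax?_eq_of_mem_iff (l1 l2 : List Int) (h : ∀ x, x ∈ l1 ↔ x ∈ l2) :
    PySem.List.max? l1 (fun x => x) = PySem.List.max? l2 (fun x => x) := by
  cases h1 : PySem.List.max? l1 (fun x => x) with
  | none =>
    have e1 : l1 = [] := (PySem.List.max?_eq_none_iff _ _).mp h1
    have e2 : l2 = [] := by
      apply List.eq_nil_iff_forall_not_mem.mpr
      intro x hx
      exact absurd ((h x).mpr hx) (by simp [e1])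
    rw [e2, (PySem.List.max?_eq_none_iff _ _).mpr rfl]
  | some m =>
    have hm1 : m ∈ l1 := PySem.List.max?_mem h1
    have hm2 : m ∈ l2 := (h m).mp hm1
    cases h2 : PySem.List.max? l2 (fun x => x) with
    | none =>
      have : l2 = [] := (PySem.List.max?_eq_none_iff _ _).mp h2
      simp [this] at hm2
    | some m' =>
      have hm'2 : m' ∈ l2 := PySem.List.max?_mem h2
      have hle : m ≤ m' := PySem.List.max?_isMax h2 m hm2
      have hge : m' ≤ m := PySem.List.max?_isMax h1 m' ((h m').mpr hm'2)
      exact congrArg some (le_antisymm hle hge)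

theorem pvMin?_eq_of_mem_iff (l1 l2 : List Int) (h : ∀ x, x ∈ l1 ↔ x ∈ l2) :
    PySem.List.min? l1 (fun x => x) = PySem.List.min? l2 (fun x => x) := by
  cases h1 : PySem.List.min? l1 (fun x => x) with
  | none =>
    have e1 : l1 = [] := (PySem.List.min?_eq_none_iff _ _).mp h1
    have e2 : l2 = [] := by
      apply List.eq_nil_iff_forall_not_mem.mpr
      intro x hx
      exact absurd ((h x).mpr hx) (by simp [e1])
    rw [e2, (PySem.List.min?_eq_none_iff _ _).mpr rfl]
  | some m =>
    have hm1 : m ∈ l1 := PySem.List.min?_mem h1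
    have hm2 : m ∈ l2 := (h m).mp hm1
    cases h2 : PySem.List.min? l2 (fun x => x) with
    | none =>
      have : l2 = [] := (PySem.List.min?_eq_none_iff _ _).mp h2
      simp [this] at hm2
    | some m' =>
      have hm'2 : m' ∈ l2 := PySem.List.min?_mem h2
      have hle : m ≤ m' := PySem.List.min?_isMin h1 m' ((h m').mpr hm'2)
      have hge : m' ≤ m := PySem.List.min?_isMin h2 m hm2
      exact congrArg some (le_antisymm hle hge)

theorem resolve_lod_with_fallback_py_spec : Claim_equal_resolve_lod_with_fallback_py := by
  intro avail req lo hi _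
  unfold Spec_resolve_lod_with_fallback_py
  unfold resolve_lod_with_fallback_py resolve_lod_with_fallback_py_alt
  by_cases hav : avail = []
  · simp [hav]
  · simp only [if_neg hav]
    set r := max lo (min hi req) with hr
    set F := avail.filter (fun lvl => decide (lo ≤ lvl ∧ lvl ≤ hi)) with hF
    set levels := PySem.List.sorted (PySem.Set.ofList F) (fun x => x) false with hlev
    set G := avail.filter (fun x => decide (lo ≤ x ∧ x ≤ hi) && decide (x ≤ r)) with hG
    -- membership characterisations
    have hmemLev : ∀ x, x ∈ levels ↔ x ∈ F := by
      intro x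
      rw [hlev, PySem.List.mem_sorted, PySem.Set.mem_ofList]
    have hmemF : ∀ x, x ∈ F ↔ x ∈ avail ∧ (lo ≤ x ∧ x ≤ hi) := by
      intro x; simp [hF, List.mem_filter]
    have hmemG : ∀ x, x ∈ G ↔ x ∈ levels.filter (fun lvl => decide (lvl ≤ r)) := by
      intro x
      simp only [hG, List.mem_filter, hmemLev, hmemF, decide_eq_true_eq, Bool.and_eq_true]
      tauto
    -- B's fold
    rw [pvFold_split]
    simp only [← hF, ← hG]
    rw [pvMaxFold_eq_max?, pvMinFold_eq_min?]
    -- now compare branch structure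
    by_cases hFnil : F = []
    · have hlevnil : levels = [] := by
        rw [hlev, PySem.List.sorted_eq_nil_iff]
        apply List.eq_nil_iff_forall_not_mem.mpr
        intro x hx
        have : x ∈ F := (PySem.Set.mem_ofList _ _).mp hx
        simp [hFnil] at this
      have hGnil : G = [] := by
        apply List.eq_nil_iff_forall_not_mem.mpr
        intro x hx
        have := (hmemG x).mp hx
        simp [hlevnil] at this
      rw [hGnil]
      simp [hlevnil, (PySem.List.max?_eq_none_iff ([] : List Int) (fun x => x)).mpr rfl,
            hFnil, (PySem.List.min?_eq_none_iff ([] : List Int) (fun x => x)).mpr rfl]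
    · have hlevne : ¬ levels = [] := by
        intro hc
        apply hFnil
        apply List.eq_nil_iff_forall_not_mem.mpr
        intro x hx
        exact absurd ((hmemLev x).mpr hx) (by simp [hc])
      simp only [if_neg hlevne]
      by_cases hGnil : G = []
      · have hLEnil : levels.filter (fun lvl => decide (lvl ≤ r)) = [] := by
          apply List.eq_nil_iff_forall_not_mem.mpr
          intro x hx
          exact absurd ((hmemG x).mpr hx) (by simp [hGnil])
        simp only [hLEnil, ne_eq, not_true_eq_false, if_false]
        rw [hGnil]
        have : PySem.List.max? ([] : List Int) (fun x => x) = none := (PySem.List.max?_eq_none_iff _ _).mpr rfl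
        rw [this]
        exact pvMin?_eq_of_mem_iff levels F hmemLev
      · have hLEne : levels.filter (fun lvl => decide (lvl ≤ r)) ≠ [] := by
          intro hc
          apply hGnil
          apply List.eq_nil_iff_forall_not_mem.mpr
          intro x hx
          exact absurd ((hmemG x).mp hx) (by simp [hc])
        simp only [ne_eq, hLEne, not_false_eq_true, if_true]
        have heq := pvMax?_eq_of_mem_iff (levels.filter (fun lvl => decide (lvl ≤ r))) G
          (fun x => (hmemG x).symm)
        rw [heq]
        cases hmx : PySem.List.max? G (fun x => x) with
        | none => exact absurd ((PySem.List.max?_eq_none_iff _ _).mp hmx) hGnil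
        | some m => rfl
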